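-- pv_equiv track=rewrite | github.com/MrBrantCode/unitest_baseline | mut_generate/mist_train_cf/cf_92820/solution.py | matrix_to_list
-- ===== SOURCE A (Python) =====
-- def matrix_to_list(matrix, n, m):
--     result = []
--     row = n - 1
--     col = 0
--
--     while row >= 0 and col < m:
--         current_row = []
--
--         while row >= 0:
--             current_row.append(matrix[row][col])
--             row -= 1
--
--         result.append(current_row)
--         col += 1
--         row = n - 1
--
--     return result
-- ===== SOURCE B (Python) =====
-- def matrix_to_list(matrix, n, m):
--     if n <= 0 or m <= 0:
--         return []
--     cols = [[] for _ in range(m)]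
--     for r in range(n - 1, -1, -1):
--         for c in range(m):
--             cols[c].append(matrix[r][c])
--     return cols
-- ===== Notes on version B (the rewrite author's own statement) =====
-- stated objective: alternative
-- what changed: A walks column-major with nested while loops, rebuilding one column list per outer pass; B makes a single row-major sweep (rows n-1 down to 0) that appends each entry to one of m column accumulators created up front.
import Mathlib
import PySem

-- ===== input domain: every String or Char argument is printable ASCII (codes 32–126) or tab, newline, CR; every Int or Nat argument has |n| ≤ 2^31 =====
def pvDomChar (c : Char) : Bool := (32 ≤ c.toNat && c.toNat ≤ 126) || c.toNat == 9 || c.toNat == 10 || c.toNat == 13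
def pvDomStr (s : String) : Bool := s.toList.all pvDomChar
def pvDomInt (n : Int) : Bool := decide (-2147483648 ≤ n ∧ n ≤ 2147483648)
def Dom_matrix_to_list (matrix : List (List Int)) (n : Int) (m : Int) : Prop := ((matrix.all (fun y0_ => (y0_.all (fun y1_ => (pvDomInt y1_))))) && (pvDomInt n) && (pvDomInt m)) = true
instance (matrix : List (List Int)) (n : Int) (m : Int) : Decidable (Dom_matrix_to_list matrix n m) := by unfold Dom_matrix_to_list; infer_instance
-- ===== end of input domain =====

-- B builds all m columns at once in a single row-major sweep (rows n-1 down to 0), instead of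
-- A's column-major nested while loops rebuilding one column at a time: a different decomposition.

-- ===== PORT A =====
-- inner while loop of A: walks row down to 0 building current_row
def mtlInner (matrix : List (List Int)) (row col : Int) : List Int :=
  if h : 0 ≤ row then
    PySem.List.pyGetD (PySem.List.pyGetD matrix row []) col 0 :: mtlInner matrix (row - 1) col
  else []
termination_by (row + 1).toNat
decreasing_by omega

-- outer while loop of A
def mtlOuter (matrix : List (List Int)) (n row col m : Int) : List (List Int) :=
  if h : 0 ≤ row ∧ col < m then
    mtlInner matrix row col :: mtlOuter matrix n (n - 1) (col + 1) m
  else []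
termination_by (m - col).toNat
decreasing_by omega

def matrix_to_list (matrix : List (List Int)) (n : Int) (m : Int) : List (List Int) :=
  mtlOuter matrix n (n - 1) 0 m

-- ===== PORT B =====
def matrix_to_list_alt (matrix : List (List Int)) (n : Int) (m : Int) : List (List Int) :=
  if n ≤ 0 ∨ m ≤ 0 then []
  else
    (PySem.List.pyRange (n - 1) (-1) (-1)).foldl
      (fun cols r =>
        (PySem.List.pyRange 0 m 1).foldl
          (fun cols c =>
            cols.modify c.toNat
              (fun l => l ++ [PySem.List.pyGetD (PySem.List.pyGetD matrix r []) c 0]))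
          cols)
      (List.replicate m.toNat [])

-- ===== PRECONDITION & SPEC =====
-- Pre_ excludes exactly the inputs where Python A raises IndexError: when both dimensions are
-- positive, the first n rows must exist and each accessed row must have at least m entries.
def Pre_matrix_to_list (matrix : List (List Int)) (n : Int) (m : Int) : Prop :=
  0 < n → 0 < m → (n ≤ (matrix.length : Int) ∧ ∀ row ∈ matrix.take n.toNat, m ≤ (row.length : Int))
instance (matrix : List (List Int)) (n : Int) (m : Int) : Decidable (Pre_matrix_to_list matrix n m) := by unfold Pre_matrix_to_list; infer_instance
def pvWitness_matrix_to_list : List (List Int) × Int × Int := ([[1, 2], [3, 4]], 2, 2)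

def Spec_matrix_to_list (matrix : List (List Int)) (n : Int) (m : Int) (out : List (List Int)) : Prop := out = matrix_to_list_alt matrix n m
instance (matrix : List (List Int)) (n : Int) (m : Int) (out : List (List Int)) : Decidable (Spec_matrix_to_list matrix n m out) := by unfold Spec_matrix_to_list; infer_instance

-- ===== CLAIM (what is proved, stated in full; the proofs are below) =====
def Claim_equal_matrix_to_list : Prop := ∀ (matrix : List (List Int)) (n : Int) (m : Int), Dom_matrix_to_list matrix n m → Pre_matrix_to_list matrix n m → Spec_matrix_to_list matrix n m (matrix_to_list matrix n m)

-- ===== LEMMAS AND PROOFS =====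

-- A's inner loop builds the column list [matrix[row][col], ..., matrix[0][col]]
theorem mtlInner_eq (matrix : List (List Int)) (col : Int) : ∀ row : Int,
    mtlInner matrix row col
      = (PySem.List.pyRange row (-1) (-1)).map
          (fun r => PySem.List.pyGetD (PySem.List.pyGetD matrix r []) col 0) := by
  intro row
  induction hk : (row + 1).toNat generalizing row with
  | zero =>
      rw [mtlInner]
      rw [PySem.List.pyRange_neg_one_eq_nil (by omega)]
      simp [show ¬ (0 ≤ row) by omega]
  | succ k ih =>
      rw [mtlInner]
      by_cases h : 0 ≤ row
      · rw [PySem.List.pyRange_neg_one_cons (by omega)]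
        simp only [h, dif_pos, List.map_cons, List.cons.injEq, true_and]
        exact ih (row - 1) (by omega)
      · rw [PySem.List.pyRange_neg_one_eq_nil (by omega)]
        simp [h]

-- A's outer loop maps the inner loop over the remaining column indices (when n-1 ≥ 0)
theorem mtlOuter_eq (matrix : List (List Int)) (n m : Int) (hn : 0 ≤ n - 1) : ∀ col : Int,
    mtlOuter matrix n (n - 1) col m
      = (PySem.List.pyRange col m 1).map (fun c => mtlInner matrix (n - 1) c) := by
  intro col
  induction hk : (m - col).toNat generalizing col with
  | zero =>
      rw [mtlOuter]
      rw [PySem.List.pyRange_one_eq_nil (by omega)]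
      simp only [show ¬ (0 ≤ n - 1 ∧ col < m) by omega, dif_neg, not_false_iff, List.map_nil]
  | succ k ih =>
      rw [mtlOuter]
      by_cases h : col < m
      · rw [PySem.List.pyRange_one_cons h]
        simp only [hn, h, and_self, dif_pos, List.map_cons, List.cons.injEq, true_and]
        exact ih (col + 1) (by omega)
      · rw [PySem.List.pyRange_one_eq_nil (by omega)]
        simp [h]

-- B's inner loop: modifying every position of a range-map appends the c-th value to the c-th list
theorem alt_inner_eq (v : Int → List Int → List Int) (m : Int) :
    ∀ (a : Int), 0 ≤ a → ∀ (g : Int → List Int),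
    (PySem.List.pyRange a m 1).foldl
        (fun cols c => cols.modify c.toNat (v c)) ((PySem.List.pyRange 0 m 1).map g)
      = (PySem.List.pyRange 0 m 1).map (fun c => if a ≤ c then v c (g c) else g c) := by
  intro a ha g
  induction hk : (m - a).toNat generalizing a g with
  | zero =>
      rw [PySem.List.pyRange_one_eq_nil (a := a) (by omega)]
      simp only [List.foldl_nil]
      apply List.map_congr_left
      intro c hc
      have := (PySem.List.mem_pyRange_one).1 hc
      simp [show ¬ a ≤ c by omega]
  | succ k ih =>
      have ham : a < m := by omega
      rw [PySem.List.pyRange_one_cons ham]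
      simp only [List.foldl_cons]
      have hstep : ((PySem.List.pyRange 0 m 1).map g).modify a.toNat (v a)
          = (PySem.List.pyRange 0 m 1).map (fun c => if a + 1 ≤ c then g c else if a ≤ c then v c (g c) else g c) := by
        refine List.ext_getElem (by simp) ?_
        intro i h1 h2
        rw [List.getElem_modify]
        simp only [List.getElem_map, PySem.List.getElem_pyRange_one]
        split_ifs with h3 h4 h5 <;> first | rfl | omega | (rw [show (0:Int) + (i:Int) = a by omega])
      rw [hstep, ih (a + 1) (by omega)
            (fun c => if a + 1 ≤ c then g c else if a ≤ c then v c (g c) else g c) (by omega)]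
      apply List.map_congr_left
      intro c hc
      by_cases h1 : a + 1 ≤ c
      · simp [h1, show a ≤ c by omega]
      · by_cases h2 : a ≤ c <;> simp [h1, h2]

-- B's row fold: each row appends its values to all the column lists
theorem alt_rows_eq (matrix : List (List Int)) (m : Int) :
    ∀ (rs : List Int) (g : Int → List Int),
    rs.foldl
        (fun cols r =>
          (PySem.List.pyRange 0 m 1).foldl
            (fun cols c =>
              cols.modify c.toNat
                (fun l => l ++ [PySem.List.pyGetD (PySem.List.pyGetD matrix r []) c 0]))
            cols)
        ((PySem.List.pyRange 0 m 1).map g)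
      = (PySem.List.pyRange 0 m 1).map
          (fun c => g c ++ rs.map (fun r => PySem.List.pyGetD (PySem.List.pyGetD matrix r []) c 0)) := by
  intro rs
  induction rs with
  | nil => intro g; simp
  | cons r rs ih =>
      intro g
      simp only [List.foldl_cons]
      rw [alt_inner_eq (fun c l => l ++ [PySem.List.pyGetD (PySem.List.pyGetD matrix r []) c 0]) m 0 le_rfl g]
      have hcongr : (PySem.List.pyRange 0 m 1).map (fun c => if (0:Int) ≤ c then g c ++ [PySem.List.pyGetD (PySem.List.pyGetD matrix r []) c 0] else g c)
          = (PySem.List.pyRange 0 m 1).map (fun c => g c ++ [PySem.List.pyGetD (PySem.List.pyGetD matrix r []) c 0]) := by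
        apply List.map_congr_left
        intro c hc
        have := (PySem.List.mem_pyRange_one).1 hc
        simp [this.1]
      rw [hcongr, ih]
      apply List.map_congr_left
      intro c _
      simp [List.append_assoc]

-- ===== VERDICT (by name: the statement is the Claim_ definition above) =====
theorem matrix_to_list_spec : Claim_equal_matrix_to_list := by
  intro matrix n m _ _
  unfold Spec_matrix_to_list matrix_to_list matrix_to_list_alt
  by_cases h : n ≤ 0 ∨ m ≤ 0
  · rw [if_pos h, mtlOuter]
    simp only [show ¬ (0 ≤ n - 1 ∧ 0 < m) by omega, dif_neg, not_false_iff]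
  · push_neg at h
    rw [if_neg (by omega)]
    have hrep : (List.replicate m.toNat ([] : List Int))
        = (PySem.List.pyRange 0 m 1).map (fun _ => ([] : List Int)) := by
      rw [List.map_const', PySem.List.length_pyRange_one]
      norm_num
    rw [hrep, alt_rows_eq matrix m, mtlOuter_eq matrix n m (by omega) 0]
    apply List.map_congr_left
    intro c _
    rw [mtlInner_eq]
    simp
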